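-- pv_equiv track=rewrite | github.com/v4lkyr0/Buildware-Tool | Programs/Plugins/Utils.py | Prenium
-- ===== SOURCE A (Python) =====
-- def Prenium(text):
--     start_color = (186, 85, 211)
--     end_color   = (123, 31, 162)
--     num_steps   = 3
--     colors      = []
--
--     for i in range(num_steps):
--         R = start_color[0] + (end_color[0] - start_color[0]) * i // (num_steps - 1)
--         G = start_color[1] + (end_color[1] - start_color[1]) * i // (num_steps - 1)
--         B = start_color[2] + (end_color[2] - start_color[2]) * i // (num_steps - 1)
--         colors.append((R, G, B))
--
--     colors += list(reversed(colors[:-1]))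
--
--     def ColorText(R, G, B, Char):
--         return f"\033[38;2;{R};{G};{B}m{Char}"
--
--     result      = []
--     color_index = 0
--
--     for char in text:
--         if char == '\n':
--             result.append('\033[0m\n')
--         else:
--             color = colors[color_index % len(colors)]
--             result.append(ColorText(*color, char))
--             color_index += 1
--
--     result.append('\033[0m')
--     return ''.join(result)
-- ===== SOURCE B (Python) =====
-- def Prenium(text):
--     start_color = (186, 85, 211)
--     end_color   = (123, 31, 162)
--     num_steps   = 3
--     colors      = []
--
--     for i in range(num_steps):
--         R = start_color[0] + (end_color[0] - start_color[0]) * i // (num_steps - 1)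
--         G = start_color[1] + (end_color[1] - start_color[1]) * i // (num_steps - 1)
--         B = start_color[2] + (end_color[2] - start_color[2]) * i // (num_steps - 1)
--         colors.append((R, G, B))
--
--     colors += list(reversed(colors[:-1]))
--
--     rendered = []
--     k = 0
--     for segment in text.split('\n'):
--         buf = []
--         for ch in segment:
--             r, g, b = colors[k % len(colors)]
--             buf.append(f"\033[38;2;{r};{g};{b}m{ch}")
--             k += 1
--         rendered.append(''.join(buf))
--     return '\033[0m\n'.join(rendered) + '\033[0m'
-- ===== Notes on version B (the rewrite author's own statement) =====
-- stated objective: alternative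
-- what changed: Replaces A's single char-by-char loop with a newline branch by splitting the text on '\n', rendering each segment char-by-char with the color index carried across segments, and joining the rendered segments with '\033[0m\n' plus a final '\033[0m'.
import Mathlib
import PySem

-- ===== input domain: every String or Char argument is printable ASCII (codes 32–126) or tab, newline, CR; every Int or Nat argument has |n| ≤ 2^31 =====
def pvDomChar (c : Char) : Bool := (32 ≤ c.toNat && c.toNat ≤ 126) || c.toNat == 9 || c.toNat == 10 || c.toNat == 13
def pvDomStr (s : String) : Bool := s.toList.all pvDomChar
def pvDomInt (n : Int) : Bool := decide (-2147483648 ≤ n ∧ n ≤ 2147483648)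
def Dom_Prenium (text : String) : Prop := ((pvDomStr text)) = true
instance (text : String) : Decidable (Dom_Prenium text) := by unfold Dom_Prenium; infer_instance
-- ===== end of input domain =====

-- B replaces A's char-by-char loop with newline special-casing by a split-on-'\n',
-- render-each-segment-then-join decomposition (objective: alternative; return value only, no side effects).

-- ===== PORT A =====
-- palette construction, shared verbatim by both Pythons (identical code in Source A and Source B)
def pvColors : List (Int × Int × Int) :=
  let base : List (Int × Int × Int) :=
    (PySem.List.pyRange 0 3 1).foldl (fun acc i =>
      acc ++ [(186 + PySem.Int.floordiv ((123 - 186) * i) (3 - 1),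
               85 + PySem.Int.floordiv ((31 - 85) * i) (3 - 1),
               211 + PySem.Int.floordiv ((162 - 211) * i) (3 - 1))]) []
  base ++ (PySem.List.slice base none (some (-1))).reverse

-- f"\033[38;2;{R};{G};{B}m{Char}"  (exact in both Pythons)
def pvColorText (rgb : Int × Int × Int) (c : Char) : List Char :=
  "\x1b[38;2;".toList ++ (PySem.Int.toStr rgb.1).toList ++ ";".toList ++
    (PySem.Int.toStr rgb.2.1).toList ++ ";".toList ++ (PySem.Int.toStr rgb.2.2).toList ++
    "m".toList ++ [c]

-- A's for-loop over the characters (the final result.append('\033[0m') lands in the base case)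
def pvLoopA : List Char → Int → List Char
  | [], _ => "\x1b[0m".toList
  | c :: cs, k =>
    if c = '\n' then "\x1b[0m\n".toList ++ pvLoopA cs k
    else pvColorText (pvColors.getD ((PySem.Int.mod k (pvColors.length : Int)).toNat) (0, 0, 0)) c
           ++ pvLoopA cs (k + 1)

def Prenium (text : String) : String := String.ofList (pvLoopA text.toList 0)

-- ===== PORT B =====
-- text.split('\n') (first segment, remaining segments) — always at least one segment
def pvSplit : List Char → List Char × List (List Char)
  | [] => ([], [])
  | c :: cs =>
    let (s, ss) := pvSplit cs
    if c = '\n' then ([], s :: ss) else (c :: s, ss)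

-- render one segment with the running color index k, returning the updated index
def pvRenderSeg : List Char → Int → List Char × Int
  | [], k => ([], k)
  | c :: cs, k =>
    let colored := pvColorText (pvColors.getD ((PySem.Int.mod k (pvColors.length : Int)).toNat) (0, 0, 0)) c
    let (rest, k') := pvRenderSeg cs (k + 1)
    (colored ++ rest, k')

-- render every segment, threading the color index across segments
def pvRenderAll : List (List Char) → Int → List (List Char)
  | [], _ => []
  | s :: ss, k =>
    let (r, k') := pvRenderSeg s k
    r :: pvRenderAll ss k'

-- '\033[0m\n'.join(rendered)
def pvJoin : List (List Char) → List Char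
  | [] => []
  | [r] => r
  | r :: rs => r ++ "\x1b[0m\n".toList ++ pvJoin rs

def Prenium_alt (text : String) : String :=
  let (s, ss) := pvSplit text.toList
  String.ofList (pvJoin (pvRenderAll (s :: ss) 0) ++ "\x1b[0m".toList)

-- ===== PRECONDITION & SPEC =====
def Spec_Prenium (text : String) (out : String) : Prop := out = Prenium_alt text
instance (text : String) (out : String) : Decidable (Spec_Prenium text out) := by unfold Spec_Prenium; infer_instance

-- ===== CLAIM (what is proved, stated in full; the proofs are below) =====
def Claim_equal_Prenium : Prop := ∀ (text : String), Dom_Prenium text → Spec_Prenium text (Prenium text)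

-- ===== LEMMAS AND PROOFS =====

lemma pvJoin_prepend (x r : List Char) (rs : List (List Char)) :
    pvJoin ((x ++ r) :: rs) = x ++ pvJoin (r :: rs) := by
  cases rs <;> simp [pvJoin]

lemma pvLoopA_eq_alt (cs : List Char) (k : Int) :
    pvLoopA cs k =
      pvJoin (pvRenderAll ((pvSplit cs).1 :: (pvSplit cs).2) k) ++ "\x1b[0m".toList := by
  induction cs generalizing k with
  | nil => simp [pvLoopA, pvSplit, pvRenderAll, pvRenderSeg, pvJoin]
  | cons c cs ih =>
    by_cases h : c = '\n'
    · subst h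
      rw [show pvLoopA ('\n' :: cs) k = "\x1b[0m\n".toList ++ pvLoopA cs k from rfl, ih k]
      simp only [pvSplit]
      cases h2 : pvSplit cs with
      | mk s ss =>
        simp [pvRenderAll, pvRenderSeg, pvJoin]
    · cases h2 : pvSplit cs with
      | mk s ss =>
        cases h3 : pvRenderSeg s (k + 1) with
        | mk r k' =>
          simp only [pvLoopA, if_neg h, pvSplit, h2, ih (k + 1)]
          simp only [pvRenderAll, pvRenderSeg, h3]
          rw [pvJoin_prepend]
          simp

-- ===== VERDICT (by name: the statement is the Claim_ definition above) =====
theorem Prenium_spec : Claim_equal_Prenium := by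
  intro text _
  unfold Spec_Prenium Prenium Prenium_alt
  rw [pvLoopA_eq_alt]
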